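-- pv_equiv track=rewrite | github.com/Snowwpanda/adventofcode | adventofcode21/17/17.py | binsearch_ymin
-- ===== SOURCE A (Python) =====
-- def cal_y(start, steps):
--     velo_dist = steps * start
--     gravity = (steps * (steps - 1)) // 2
--     return velo_dist - gravity
--
-- def binsearch_ymin(param, steps):
--     # assuming param negative
--     left = param
--     right = steps
--     while left != right:
--         start = (left + right) // 2
--         if cal_y(start, steps) < param:
--             left = start + 1
--         else:
--             right = start
--     return left
-- ===== SOURCE B (Python) =====
-- def binsearch_ymin(param, steps):
--     # Closed form: cal_y(start, steps) = steps*start - gravity is linear in start,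
--     # so the least start in [param, steps] with cal_y >= param is the ceiling
--     # division threshold clamped into the interval (for steps <= 0 it is param).
--     if steps <= 0:
--         return param
--     gravity = (steps * (steps - 1)) // 2
--     s0 = -((-(param + gravity)) // steps)   # ceil((param + gravity) / steps)
--     return max(param, min(steps, s0))
-- ===== Notes on version B (the rewrite author's own statement) =====
-- stated objective: simpler
-- what changed: Replaces the binary-search loop by a closed form: cal_y is linear in start, so the answer is the ceiling division ceil((param+gravity)/steps) clamped to [param, steps] (param when steps <= 0).
import Mathlib
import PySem

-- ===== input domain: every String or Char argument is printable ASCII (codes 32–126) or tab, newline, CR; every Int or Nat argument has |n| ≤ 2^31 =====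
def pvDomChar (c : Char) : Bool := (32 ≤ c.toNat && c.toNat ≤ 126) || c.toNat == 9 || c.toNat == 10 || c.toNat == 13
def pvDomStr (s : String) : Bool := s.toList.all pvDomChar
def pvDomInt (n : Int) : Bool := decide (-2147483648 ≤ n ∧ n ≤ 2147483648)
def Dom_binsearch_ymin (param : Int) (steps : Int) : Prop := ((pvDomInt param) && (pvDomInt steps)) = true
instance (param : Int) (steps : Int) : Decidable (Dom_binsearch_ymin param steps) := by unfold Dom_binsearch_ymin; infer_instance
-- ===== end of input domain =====

-- B computes the result by a closed form (ceiling division clamped to [param, steps]) instead of A's binary-search loop.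

-- ===== PORT A =====
def cal_y (start : Int) (steps : Int) : Int :=
  let velo_dist := steps * start
  let gravity := PySem.Int.floordiv (steps * (steps - 1)) 2
  velo_dist - gravity

-- the while loop of A, as fuel recursion (the fuel bound is reached on no input satisfying Pre_)
def binsearchLoop (param : Int) (steps : Int) : Nat → Int → Int → Int
  | 0, left, _ => left
  | fuel + 1, left, right =>
    if left = right then left
    else
      let start := PySem.Int.floordiv (left + right) 2
      if cal_y start steps < param then binsearchLoop param steps fuel (start + 1) right
      else binsearchLoop param steps fuel left start

def binsearch_ymin (param : Int) (steps : Int) : Int :=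
  binsearchLoop param steps ((steps - param).toNat + 1) param steps

-- ===== PORT B =====
def binsearch_ymin_alt (param : Int) (steps : Int) : Int :=
  if steps ≤ 0 then param
  else
    let gravity := PySem.Int.floordiv (steps * (steps - 1)) 2
    let s0 := -(PySem.Int.floordiv (-(param + gravity)) steps)  -- ceil((param+gravity)/steps)
    max param (min steps s0)

-- ===== PRECONDITION & SPEC =====
-- A's while loop never terminates when param > steps (left can never reach right); Pre_ excludes exactly those inputs.
def Pre_binsearch_ymin (param : Int) (steps : Int) : Prop := param ≤ steps
instance (param : Int) (steps : Int) : Decidable (Pre_binsearch_ymin param steps) := by unfold Pre_binsearch_ymin; infer_instance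
def pvWitness_binsearch_ymin : Int × Int := (-7, 4)

def Spec_binsearch_ymin (param : Int) (steps : Int) (out : Int) : Prop := out = binsearch_ymin_alt param steps
instance (param : Int) (steps : Int) (out : Int) : Decidable (Spec_binsearch_ymin param steps out) := by unfold Spec_binsearch_ymin; infer_instance

-- ===== CLAIM (what is proved, stated in full; the proofs are below) =====
def Claim_equal_binsearch_ymin : Prop := ∀ (param : Int) (steps : Int), Dom_binsearch_ymin param steps → Pre_binsearch_ymin param steps → Spec_binsearch_ymin param steps (binsearch_ymin param steps)

-- ===== LEMMAS AND PROOFS =====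

-- 2*gravity = steps*(steps-1)
lemma gravity_eq (steps : Int) :
    2 * PySem.Int.floordiv (steps * (steps - 1)) 2 = steps * (steps - 1) := by
  obtain ⟨k, hk⟩ := Int.even_mul_pred_self steps
  rw [hk]
  rw [show k + k = k * 2 by ring]
  rw [(PySem.Int.floordiv_eq_iff_of_pos (by norm_num)).mpr ⟨le_refl _, by nlinarith⟩]
  ring

-- ans bounds: param ≤ alt ≤ steps (under Pre_)
lemma alt_lower (param steps : Int) :
    param ≤ binsearch_ymin_alt param steps := by
  unfold binsearch_ymin_alt
  split_ifs with hs
  · exact le_refl _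
  · exact le_max_left _ _

lemma alt_upper (param steps : Int) (h : param ≤ steps) :
    binsearch_ymin_alt param steps ≤ steps := by
  unfold binsearch_ymin_alt
  split_ifs with hs
  · exact h
  · exact max_le h (min_le_left _ _)

-- the ceiling bracket: s ≥ s0 ↔ steps*s ≥ param+gravity (steps > 0)
lemma ceil_le_iff (x steps s : Int) (hs : 0 < steps) :
    -(PySem.Int.floordiv (-x) steps) ≤ s ↔ x ≤ steps * s := by
  constructor
  · intro h
    have h1 : -s ≤ PySem.Int.floordiv (-x) steps := by omega
    have := (PySem.Int.le_floordiv_iff_mul_le (a := -x) (b := steps) (q := -s) hs).mp h1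
    nlinarith
  · intro h
    have h1 : -s * steps ≤ -x := by nlinarith
    have := (PySem.Int.le_floordiv_iff_mul_le (a := -x) (b := steps) (q := -s) hs).mpr h1
    omega

-- if cal_y start < param then the answer is above start
lemma alt_gt_of_lt (param steps start : Int) (hp : param ≤ start) (hss : start < steps)
    (hlt : cal_y start steps < param) :
    start < binsearch_ymin_alt param steps := by
  have hs : 0 < steps := by
    by_contra hns
    rw [not_lt] at hns
    -- steps ≤ 0: cal_y start steps ≥ param always holds there, contradicting hlt
    have hg := gravity_eq steps
    unfold cal_y at hlt
    simp only at hlt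
    have h1 : steps * steps ≤ steps * start := by nlinarith
    have h2 : 0 ≤ steps * (steps + 1) := by
      rcases hns.lt_or_eq with h | h
      · nlinarith [mul_nonneg (by omega : (0:Int) ≤ -steps) (by omega : (0:Int) ≤ -(steps + 1))]
      · simp [h]
    nlinarith
  unfold binsearch_ymin_alt
  rw [if_neg (by omega)]
  have hg := gravity_eq steps
  unfold cal_y at hlt
  simp only at hlt
  have hkey : ¬ (-(PySem.Int.floordiv (-(param + PySem.Int.floordiv (steps * (steps - 1)) 2)) steps) ≤ start) := by
    rw [ceil_le_iff _ _ _ hs]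
    omega
  have := lt_min hss (by omega : start < -(PySem.Int.floordiv (-(param + PySem.Int.floordiv (steps * (steps - 1)) 2)) steps))
  exact lt_of_lt_of_le this (le_max_right _ _)

-- if cal_y start ≥ param then the answer is ≤ start
lemma alt_le_of_ge (param steps start : Int) (hp : param ≤ start)
    (hge : param ≤ cal_y start steps) :
    binsearch_ymin_alt param steps ≤ start := by
  unfold binsearch_ymin_alt
  split_ifs with hs
  · exact hp
  · rw [not_le] at hs
    have hg := gravity_eq steps
    unfold cal_y at hge
    simp only at hge
    have hkey : -(PySem.Int.floordiv (-(param + PySem.Int.floordiv (steps * (steps - 1)) 2)) steps) ≤ start := by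
      rw [ceil_le_iff _ _ _ hs]; omega
    exact max_le hp (le_trans (min_le_right _ _) hkey)

-- the binary-search invariant: if the answer lies in [left, right] and fuel suffices, the loop returns it
lemma loop_eq (param steps : Int) (fuel : Nat) :
    ∀ left right : Int, param ≤ left → left ≤ binsearch_ymin_alt param steps →
    binsearch_ymin_alt param steps ≤ right → right ≤ steps →
    (right - left).toNat < fuel →
    binsearchLoop param steps fuel left right = binsearch_ymin_alt param steps := by
  induction fuel with
  | zero => intro _ _ _ _ _ _ hf; omega
  | succ n ih =>
    intro left right hpl hla har hrs hf
    unfold binsearchLoop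
    by_cases heq : left = right
    · rw [if_pos heq]; omega
    · rw [if_neg heq]
      have hlr : left < right := by omega
      obtain ⟨hm1, hm2⟩ := PySem.Int.floordiv_two_mid_bounds (lo := left) (hi := right) hlr.le
      have hmid_lt : PySem.Int.floordiv (left + right) 2 < right := by
        rw [PySem.Int.floordiv_lt_iff_lt_mul (by norm_num)]; omega
      set start := PySem.Int.floordiv (left + right) 2 with hstart
      by_cases hc : cal_y start steps < param
      · rw [if_pos hc]
        have hgt := alt_gt_of_lt param steps start (le_trans hpl hm1) (by omega) hc
        exact ih (start + 1) right (by omega) (by omega) har hrs (by omega)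
      · rw [if_neg hc]
        rw [not_lt] at hc
        have hle := alt_le_of_ge param steps start (le_trans hpl hm1) hc
        exact ih left start hpl hla hle (by omega) (by omega)

-- ===== VERDICT (by name: the statement is the Claim_ definition above) =====
theorem binsearch_ymin_spec : Claim_equal_binsearch_ymin := by
  intro param steps _ hpre
  unfold Spec_binsearch_ymin binsearch_ymin
  exact loop_eq param steps _ param steps (le_refl _)
    (alt_lower param steps) (alt_upper param steps hpre) (le_refl _) (by omega)
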